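-- pv_equiv track=rewrite | github.com/lihaySwiss/self.py-course | 7 - loops/7.2.2.py | numbers_letters_count
-- ===== SOURCE A (Python) =====
-- def numbers_letters_count(my_str):
--     output_list = [0,0]
--     for i in range(len(my_str)):
--         if(my_str[i].isnumeric()):
--             output_list[0] += 1
--         else:
--             output_list[1] += 1
--     return output_list
-- ===== SOURCE B (Python) =====
-- DIGITS = "0123456789"
--
-- def numbers_letters_count(my_str):
--     num = sum(my_str.count(d) for d in DIGITS)
--     return [num, len(my_str) - num]
-- ===== Notes on version B (the rewrite author's own statement) =====
-- stated objective: faster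
-- what changed: B makes ten C-level str.count scans, one per decimal digit character, sums them, and derives the non-numeric count from the length, instead of A's single Python-level index loop testing isnumeric and incrementing one of two list counters; valid on printable ASCII where isnumeric holds exactly on the decimal digits.
import Mathlib
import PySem

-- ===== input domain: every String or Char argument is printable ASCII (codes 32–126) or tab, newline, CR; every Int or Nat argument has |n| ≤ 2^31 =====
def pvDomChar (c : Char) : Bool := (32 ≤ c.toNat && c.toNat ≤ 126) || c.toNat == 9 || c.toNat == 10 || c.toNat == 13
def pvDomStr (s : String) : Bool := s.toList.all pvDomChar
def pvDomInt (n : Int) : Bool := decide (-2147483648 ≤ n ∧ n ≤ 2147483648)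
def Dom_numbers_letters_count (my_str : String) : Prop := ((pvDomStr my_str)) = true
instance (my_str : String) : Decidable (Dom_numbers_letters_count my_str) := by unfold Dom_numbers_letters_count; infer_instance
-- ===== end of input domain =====

-- B replaces A's single index loop (test each char, bump one of two counters) by ten per-digit
-- counting scans, one str.count per decimal digit, summed; the non-numeric count comes from the length.
-- (On the printable-ASCII domain str.isnumeric coincides with PySem.Chars.isdigit.)
-- ===== PORT A =====
def numbers_letters_count (my_str : String) : List Int :=
  (PySem.List.pyRange 0 (my_str.toList.length : Int) 1).foldl
    (fun output_list i =>
      match PySem.List.pyGet? my_str.toList i with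
      | some c =>
        if PySem.Chars.isdigit c then
          [output_list.getD 0 0 + 1, output_list.getD 1 0]
        else
          [output_list.getD 0 0, output_list.getD 1 0 + 1]
      | none => output_list)
    ([0, 0] : List Int)

-- ===== PORT B =====
-- my_str.count(d) for a one-character d is exactly the count of that character: PySem.List.count.
def numbers_letters_count_alt (my_str : String) : List Int :=
  let num : Int := ("0123456789".toList.map
    (fun d => (PySem.List.count my_str.toList d : Int))).sum
  [num, (my_str.toList.length : Int) - num]

-- ===== PRECONDITION & SPEC =====
def Spec_numbers_letters_count (my_str : String) (out : List Int) : Prop := out = numbers_letters_count_alt my_str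
instance (my_str : String) (out : List Int) : Decidable (Spec_numbers_letters_count my_str out) := by unfold Spec_numbers_letters_count; infer_instance

-- ===== CLAIM (what is proved, stated in full; the proofs are below) =====
def Claim_equal_numbers_letters_count : Prop := ∀ (my_str : String), Dom_numbers_letters_count my_str → Spec_numbers_letters_count my_str (numbers_letters_count my_str)

-- ===== LEMMAS AND PROOFS =====

-- A's loop result characterised: [number of digit chars among the first n, n minus that].
theorem nlc_aux (l : List Char) (n : Nat) (hn : n ≤ l.length) :
    ((PySem.List.pyRange 0 (n : Int) 1).foldl
      (fun output_list i =>
        match PySem.List.pyGet? l i with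
        | some c =>
          if PySem.Chars.isdigit c then
            [output_list.getD 0 0 + 1, output_list.getD 1 0]
          else
            [output_list.getD 0 0, output_list.getD 1 0 + 1]
        | none => output_list)
      ([0, 0] : List Int))
    = [((l.take n).countP PySem.Chars.isdigit : Int),
       (n : Int) - ((l.take n).countP PySem.Chars.isdigit : Int)] := by
  induction n with
  | zero => simp
  | succ m ih =>
    have hm : m ≤ l.length := Nat.le_of_succ_le hn
    have hlt : m < l.length := hn
    push_cast
    rw [PySem.List.pyRange_one_succ_right (by positivity)]
    rw [List.foldl_append, ih hm]
    have hget : PySem.List.pyGet? l ((m : Int)) = some l[m] := by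
      simp [PySem.List.pyGet?_natCast, List.getElem?_eq_getElem hlt]
    have htake : l.take (m + 1) = l.take m ++ [l[m]] := by
      rw [List.take_succ, List.getElem?_eq_getElem hlt]; rfl
    simp only [List.foldl_cons, List.foldl_nil]
    push_cast [hget, htake, List.countP_append, List.countP_cons]
    by_cases hd : PySem.Chars.isdigit l[m] <;>
      simp [hd, List.getD] <;> omega

theorem nondigit (c : Char) (h0 : c ≠ '0')(h1 : c ≠ '1')(h2 : c ≠ '2')(h3 : c ≠ '3')(h4 : c ≠ '4')(h5 : c ≠ '5')(h6 : c ≠ '6')(h7 : c ≠ '7')(h8 : c ≠ '8')(h9 : c ≠ '9') : PySem.Chars.isdigit c = false := by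
  simp only [PySem.Chars.isdigit, Bool.and_eq_false_iff, decide_eq_false_iff_not]
  by_contra h
  rw [not_or, not_not, not_not] at h
  obtain ⟨ha, hb⟩ := h
  rw [Char.le_def] at ha hb
  have h48 : 48 ≤ c.val.toNat := UInt32.le_iff_toNat_le.mp ha
  have h57 : c.val.toNat ≤ 57 := UInt32.le_iff_toNat_le.mp hb
  interval_cases h : c.val.toNat <;>
    [exact h0 (Char.ext (UInt32.toNat_inj.mp h));
     exact h1 (Char.ext (UInt32.toNat_inj.mp h));
     exact h2 (Char.ext (UInt32.toNat_inj.mp h));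
     exact h3 (Char.ext (UInt32.toNat_inj.mp h));
     exact h4 (Char.ext (UInt32.toNat_inj.mp h));
     exact h5 (Char.ext (UInt32.toNat_inj.mp h));
     exact h6 (Char.ext (UInt32.toNat_inj.mp h));
     exact h7 (Char.ext (UInt32.toNat_inj.mp h));
     exact h8 (Char.ext (UInt32.toNat_inj.mp h));
     exact h9 (Char.ext (UInt32.toNat_inj.mp h))]

theorem digcount (c : Char) :
    ((("0123456789".toList).map (fun d => if d = c then (1 : Int) else 0)).sum)
    = if PySem.Chars.isdigit c then 1 else 0 := by
  by_cases h0 : c = '0' <;> by_cases h1 : c = '1' <;> by_cases h2 : c = '2' <;>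
  by_cases h3 : c = '3' <;> by_cases h4 : c = '4' <;> by_cases h5 : c = '5' <;>
  by_cases h6 : c = '6' <;> by_cases h7 : c = '7' <;> by_cases h8 : c = '8' <;>
  by_cases h9 : c = '9' <;> subst_vars <;>
    first
    | decide
    | simp [nondigit c h0 h1 h2 h3 h4 h5 h6 h7 h8 h9,
            Ne.symm h0, Ne.symm h1, Ne.symm h2, Ne.symm h3, Ne.symm h4,
            Ne.symm h5, Ne.symm h6, Ne.symm h7, Ne.symm h8, Ne.symm h9]

theorem sumcount (l : List Char) :
    (("0123456789".toList).map (fun d => (List.count d l : Int))).sum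
    = (l.countP PySem.Chars.isdigit : Int) := by
  induction l with
  | nil => simp
  | cons c t ih =>
    have hc : ∀ d : Char, (List.count d (c :: t) : Int)
        = (List.count d t : Int) + (if d = c then 1 else 0) := by
      intro d
      rw [List.count_cons]
      by_cases h : c = d
      · subst h; push_cast; simp
      · push_cast; simp [h, Ne.symm h]
    simp only [hc, List.countP_cons]
    rw [List.sum_map_add, ih, digcount c]
    by_cases hd : PySem.Chars.isdigit c <;> simp [hd]

-- ===== VERDICT (by name: the statement is the Claim_ definition above) =====
theorem numbers_letters_count_spec : Claim_equal_numbers_letters_count := by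
  intro s _
  unfold Spec_numbers_letters_count numbers_letters_count numbers_letters_count_alt
  rw [nlc_aux s.toList s.toList.length le_rfl]
  simp only [List.take_length, PySem.List.count_eq, sumcount]
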